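-- pv_equiv track=rewrite | github.com/lightclient/random | serialized_multiproof/calculate_offsets.py | prepare_indexes
-- ===== SOURCE A (Python) =====
-- def prepare_indexes(indexes):
--     raw_end_nodes = []
--
--     # Convert index to list of bits
--     for node in indexes:
--         raw_end_nodes.append([1 if x == '1' else 0 for x in "{:05b}".format(node)])
--
--     # Normalize input (e.g. align the most significant bit of all indexes)
--     for node in raw_end_nodes:
--         while node[0] == 0:
--             node.pop(0)
--             node.append(1)
--
--     return raw_end_nodes
-- ===== SOURCE B (Python) =====
-- def prepare_indexes(indexes):
--     out = []
--     for node in indexes: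
--         bits = [1 if c == '1' else 0 for c in "{:05b}".format(node)]
--         z = bits.index(1) if 1 in bits else len(bits)
--         out.append(bits[z:] + [1] * z)
--     return out
-- ===== Notes on version B (the rewrite author's own statement) =====
-- stated objective: simpler
-- what changed: B replaces A's destructive while-loop (pop from the front, append a one, re-test the head) by computing the index z of the first one-bit once and emitting the z-rotated list directly in a single pass per node, in one loop instead of A's two.
import Mathlib
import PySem

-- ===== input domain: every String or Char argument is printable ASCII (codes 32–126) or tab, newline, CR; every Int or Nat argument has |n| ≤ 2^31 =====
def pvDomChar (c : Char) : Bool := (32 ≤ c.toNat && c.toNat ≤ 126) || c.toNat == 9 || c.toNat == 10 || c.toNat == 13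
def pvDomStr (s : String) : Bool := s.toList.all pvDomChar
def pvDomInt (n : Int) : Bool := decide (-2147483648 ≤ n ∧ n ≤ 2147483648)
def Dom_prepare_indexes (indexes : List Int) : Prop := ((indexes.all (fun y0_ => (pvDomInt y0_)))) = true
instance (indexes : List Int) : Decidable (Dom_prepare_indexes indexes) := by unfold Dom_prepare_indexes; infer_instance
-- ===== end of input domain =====

-- B replaces A's pop/append while-loop by locating the first one-bit once and
-- emitting the rotated list directly in a single pass per node (objective: simpler).

-- ===== PORT A =====

-- binary digits of a natural number, most significant first ("{:b}" without padding; 0 gives [])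
def pvNatBits : Nat → List Int
  | 0 => []
  | n + 1 => pvNatBits ((n + 1) / 2) ++ [(((n + 1) % 2 : Nat) : Int)]
decreasing_by exact Nat.div_lt_self (Nat.succ_pos n) (by norm_num)

-- [1 if x == '1' else 0 for x in "{:05b}".format(node)] : the '-' sign counts toward
-- the width 5 and maps to 0 (exact port of Python's format + comprehension)
def pvToBits (node : Int) : List Int :=
  if node < 0 then
    let d := if node.natAbs = 0 then [(0 : Int)] else pvNatBits node.natAbs
    (0 : Int) :: (List.replicate (4 - d.length) (0 : Int) ++ d)
  else
    let d := if node.natAbs = 0 then [(0 : Int)] else pvNatBits node.natAbs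
    List.replicate (5 - d.length) (0 : Int) ++ d

-- while node[0] == 0: node.pop(0); node.append(1)   (fuel = node.length; the loop
-- needs at most node.length iterations: each one moves the first element to the back
-- as a 1, so after length steps the head is 1)
def pvRotLoop : Nat → List Int → List Int
  | 0, node => node
  | fuel + 1, node =>
    match node with
    | [] => node
    | a :: rest => if a = 0 then pvRotLoop fuel (rest ++ [1]) else a :: rest

def prepare_indexes (indexes : List Int) : List (List Int) :=
  let raw_end_nodes := indexes.map pvToBits
  raw_end_nodes.map (fun node => pvRotLoop node.length node)

-- ===== PORT B =====

-- one pass per node: z = index of the first 1 (or length), result bits[z:] + [1]*z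
def prepare_indexes_alt (indexes : List Int) : List (List Int) :=
  indexes.map (fun node =>
    let bits := pvToBits node
    let z := if (1 : Int) ∈ bits then bits.findIdx (· == (1 : Int)) else bits.length
    bits.drop z ++ List.replicate z (1 : Int))

-- ===== PRECONDITION & SPEC =====
def Spec_prepare_indexes (indexes : List Int) (out : List (List Int)) : Prop := out = prepare_indexes_alt indexes
instance (indexes : List Int) (out : List (List Int)) : Decidable (Spec_prepare_indexes indexes out) := by unfold Spec_prepare_indexes; infer_instance

-- ===== CLAIM (what is proved, stated in full; the proofs are below) =====
def Claim_equal_prepare_indexes : Prop := ∀ (indexes : List Int), Dom_prepare_indexes indexes → Spec_prepare_indexes indexes (prepare_indexes indexes)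

-- ===== LEMMAS AND PROOFS =====

lemma pvNatBits_mem {n : Nat} {x : Int} (hx : x ∈ pvNatBits n) : x = 0 ∨ x = 1 := by
  induction n using Nat.strong_induction_on with
  | _ n ih =>
    match n with
    | 0 => simp [pvNatBits] at hx
    | m + 1 =>
      rw [pvNatBits] at hx
      rcases List.mem_append.1 hx with h | h
      · exact ih ((m + 1) / 2) (Nat.div_lt_self (Nat.succ_pos m) (by norm_num)) h
      · simp only [List.mem_singleton] at h
        subst h
        rcases Nat.mod_two_eq_zero_or_one (m + 1) with h | h <;> simp [h]

lemma pvToBits_mem {node : Int} {x : Int} (hx : x ∈ pvToBits node) : x = 0 ∨ x = 1 := by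
  unfold pvToBits at hx
  split_ifs at hx <;>
    simp only [List.mem_cons, List.mem_append, List.mem_replicate,
      List.not_mem_nil, or_false] at hx <;>
    first
      | exact Or.inl hx
      | (rcases hx with hx | hx | hx <;>
          first | exact Or.inl hx | exact Or.inl hx.2 | exact pvNatBits_mem hx)
      | (rcases hx with hx | hx <;>
          first | exact Or.inl hx | exact Or.inl hx.2 | exact pvNatBits_mem hx)

-- List.findIdx returns the length when no element matches, so it is exactly B's z
lemma pvFindIdx_le (l : List Int) : l.findIdx (· == (1 : Int)) ≤ l.length := by
  induction l with
  | nil => simp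
  | cons a rest ih =>
    rw [List.findIdx_cons]
    cases h : (a == (1 : Int)) <;> simp [h] <;> omega

lemma pvFindIdx_eq_length {l : List Int} (h : (1 : Int) ∉ l) :
    l.findIdx (· == (1 : Int)) = l.length := by
  have hle := pvFindIdx_le l
  by_contra hne
  have hlt : l.findIdx (· == (1 : Int)) < l.length := lt_of_le_of_ne hle hne
  exact absurd (List.findIdx_lt_length.1 hlt) (by simpa using h)

-- the rotate loop equals drop-and-pad, for any list of 0/1 bits (z = length if no 1)
lemma pvRotLoop_eq (fuel : Nat) (l : List Int)
    (h01 : ∀ x ∈ l, x = 0 ∨ x = 1)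
    (hfuel : l.findIdx (· == (1 : Int)) ≤ fuel) :
    pvRotLoop fuel l = l.drop (l.findIdx (· == (1 : Int)))
      ++ List.replicate (l.findIdx (· == (1 : Int))) (1 : Int) := by
  induction fuel generalizing l with
  | zero =>
    have h0 : l.findIdx (· == (1 : Int)) = 0 := Nat.le_zero.1 hfuel
    simp [pvRotLoop, h0]
  | succ fuel ih =>
    match l with
    | [] => simp [pvRotLoop]
    | a :: rest =>
      rcases h01 a List.mem_cons_self with ha | ha
      · subst ha
        have hltr := pvFindIdx_le rest
        have hz : (((0 : Int)) :: rest).findIdx (· == (1 : Int))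
            = rest.findIdx (· == (1 : Int)) + 1 := by
          rw [List.findIdx_cons]; simp
        have hzapp : (rest ++ [(1 : Int)]).findIdx (· == (1 : Int))
            = rest.findIdx (· == (1 : Int)) := by
          rw [List.findIdx_append]
          by_cases h : (1 : Int) ∈ rest
          · rw [if_pos (List.findIdx_lt_length.2 ⟨1, h, by simp⟩)]
          · rw [if_neg (by rw [pvFindIdx_eq_length h]; omega), pvFindIdx_eq_length h]
            simp [List.findIdx_cons]
        have h01' : ∀ x ∈ rest ++ [(1 : Int)], x = 0 ∨ x = 1 := by
          intro x hx
          rcases List.mem_append.1 hx with hx | hx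
          · exact h01 x (List.mem_cons_of_mem _ hx)
          · simp only [List.mem_singleton] at hx; exact Or.inr hx
        have hfuel' : (rest ++ [(1 : Int)]).findIdx (· == (1 : Int)) ≤ fuel := by
          rw [hzapp]; omega
        have hrec := ih (rest ++ [(1 : Int)]) h01' hfuel'
        have hdrop : (rest ++ [(1 : Int)]).drop (rest.findIdx (· == (1 : Int)))
            = rest.drop (rest.findIdx (· == (1 : Int))) ++ [(1 : Int)] :=
          List.drop_append_of_le_length hltr
        rw [pvRotLoop]
        simp only [hrec, hzapp, hz, hdrop, List.drop_succ_cons]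
        simp [List.replicate_succ]
      · subst ha
        have hz : (((1 : Int)) :: rest).findIdx (· == (1 : Int)) = 0 := by
          rw [List.findIdx_cons]; simp
        rw [pvRotLoop]
        simp [hz]

-- ===== VERDICT (by name: the statement is the Claim_ definition above) =====
theorem prepare_indexes_spec : Claim_equal_prepare_indexes := by
  intro indexes _
  unfold Spec_prepare_indexes prepare_indexes prepare_indexes_alt
  simp only [List.map_map]
  apply List.map_congr_left
  intro node _
  simp only [Function.comp]
  have hz : ((pvToBits node).findIdx (· == (1 : Int))
      = if (1 : Int) ∈ pvToBits node then (pvToBits node).findIdx (· == (1 : Int))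
        else (pvToBits node).length) := by
    by_cases h : (1 : Int) ∈ pvToBits node
    · rw [if_pos h]
    · rw [if_neg h, pvFindIdx_eq_length h]
  rw [← hz]
  exact pvRotLoop_eq _ _ (fun x hx => pvToBits_mem hx) (pvFindIdx_le _)
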